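-- pv_equiv track=rewrite | github.com/Reinsdyret/christmasCalendars | adventofcode/day1/solveFirst.py | getSumForLine
-- ===== SOURCE A (Python) =====
-- def getSumForLine(line):
--     firstChar = None
--     secondChar = None
--     for c in line:
--         try:
--             int(c)
--             if not firstChar:
--                 firstChar = c
--             secondChar = c
--         except:
--             pass
--
--     return int(firstChar + secondChar)
-- ===== SOURCE B (Python) =====
-- def getSumForLine(line):
--     first = next(c for c in line if c.isdigit())
--     last = next(c for c in reversed(line) if c.isdigit())
--     return int(first) * 10 + int(last)
-- ===== Notes on version B (the rewrite author's own statement) =====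
-- stated objective: simpler
-- what changed: A scans the whole line threading first/last state and parses the concatenated two-char string; B does two short-circuiting directed searches (forward for the first digit, backward for the last) and computes 10*first+last arithmetically.
-- outside the precondition, e.g. on getSumForLine('abc'): A raises TypeError, B raises StopIteration
import Mathlib
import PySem

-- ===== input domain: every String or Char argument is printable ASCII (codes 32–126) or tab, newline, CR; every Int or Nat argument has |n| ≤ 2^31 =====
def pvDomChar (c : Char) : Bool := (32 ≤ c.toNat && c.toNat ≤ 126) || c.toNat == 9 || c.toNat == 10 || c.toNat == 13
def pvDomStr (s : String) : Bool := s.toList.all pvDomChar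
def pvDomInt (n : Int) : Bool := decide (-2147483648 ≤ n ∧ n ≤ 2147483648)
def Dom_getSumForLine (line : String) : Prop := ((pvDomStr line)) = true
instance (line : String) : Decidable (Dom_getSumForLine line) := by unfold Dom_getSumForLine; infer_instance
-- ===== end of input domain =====

-- B does two short-circuiting directed digit searches and arithmetic instead of A's
-- single full-state scan followed by parsing the concatenated two-char string.

-- ===== PORT A =====
-- the loop body: int(c) succeeds for a single printable-ASCII char exactly when c is a digit;
-- firstChar is None or a one-char string, so 'not firstChar' is 'firstChar.isNone'
def pvStepA (p : Option Char × Option Char) (c : Char) : Option Char × Option Char :=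
  if c.isDigit then ((if p.1.isNone then some c else p.1), some c) else p

def getSumForLine (line : String) : Int :=
  let st := line.toList.foldl pvStepA (none, none)
  match st with
  | (some a, some b) => (PySem.Int.ofChars? [a, b]).getD 0   -- int(firstChar + secondChar); Pre_ guarantees both set
  | _ => 0

-- ===== PORT B =====
def getSumForLine_alt (line : String) : Int :=
  (((line.toList.find? (·.isDigit)).bind fun a =>
    (line.toList.reverse.find? (·.isDigit)).map fun b =>
      (PySem.Int.ofChars? [a]).getD 0 * 10 + (PySem.Int.ofChars? [b]).getD 0).getD 0)

-- ===== PRECONDITION & SPEC =====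
-- Pre_ excludes lines with no digit character, on which A raises TypeError (None + None).
def Pre_getSumForLine (line : String) : Prop := line.toList.any (·.isDigit) = true
instance (line : String) : Decidable (Pre_getSumForLine line) := by unfold Pre_getSumForLine; infer_instance
def pvWitness_getSumForLine : String := "a1b2c"

def Spec_getSumForLine (line : String) (out : Int) : Prop := out = getSumForLine_alt line
instance (line : String) (out : Int) : Decidable (Spec_getSumForLine line out) := by unfold Spec_getSumForLine; infer_instance

-- ===== CLAIM (what is proved, stated in full; the proofs are below) =====
def Claim_equal_getSumForLine : Prop := ∀ (line : String), Dom_getSumForLine line → Pre_getSumForLine line → Spec_getSumForLine line (getSumForLine line)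

-- ===== LEMMAS AND PROOFS =====

-- A's fold returns (first digit unless already set, last digit if any else the carried value)
theorem foldA_char (ds : List Char) (f l : Option Char) :
    ds.foldl pvStepA (f, l) =
      ((if f.isNone then ds.find? (·.isDigit) else f),
       (match ds.reverse.find? (·.isDigit) with | some b => some b | none => l)) := by
  induction ds generalizing f l with
  | nil => simp
  | cons c t ih =>
    by_cases hc : c.isDigit
    · cases f with
      | none =>
        simp [pvStepA, hc, ih, List.find?, List.find?_append]
        cases t.reverse.find? (·.isDigit) <;> simp
      | some x =>
        simp [pvStepA, hc, ih, List.find?_append]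
        try (cases t.reverse.find? (·.isDigit) <;> simp)
    · cases f with
      | none =>
        simp [pvStepA, hc, ih, List.find?, List.find?_append]
      | some x =>
        simp [pvStepA, hc, ih, List.find?_append]

theorem mem_digit_chars (c : Char) (h : c.isDigit = true) :
    c ∈ ['0','1','2','3','4','5','6','7','8','9'] := by
  have h1 : 48 ≤ c.toNat ∧ c.toNat ≤ 57 := by
    rw [Char.isDigit] at h
    simp only [Bool.and_eq_true, decide_eq_true_eq, UInt32.le_iff_toNat_le] at h
    exact h
  obtain ⟨ha, hb⟩ := h1
  interval_cases hn : c.toNat <;>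
    · have hc : c = Char.ofNat c.toNat := (Char.ofNat_toNat c).symm
      rw [hn] at hc
      rw [hc]; decide

theorem parse_two (a b : Char) (ha : a.isDigit = true) (hb : b.isDigit = true) :
    (PySem.Int.ofChars? [a, b]).getD 0 =
      (PySem.Int.ofChars? [a]).getD 0 * 10 + (PySem.Int.ofChars? [b]).getD 0 := by
  have ha' := mem_digit_chars a ha
  have hb' := mem_digit_chars b hb
  fin_cases ha' <;> fin_cases hb' <;> decide

-- ===== VERDICT (by name: the statement is the Claim_ definition above) =====
theorem getSumForLine_spec : Claim_equal_getSumForLine := by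
  intro line _ hpre
  unfold Spec_getSumForLine getSumForLine getSumForLine_alt
  rw [foldA_char]
  have hpre' : ∃ x ∈ line.toList, x.isDigit = true := by
    simpa [Pre_getSumForLine, List.any_eq_true] using hpre
  have hfind : ∃ a, line.toList.find? (·.isDigit) = some a :=
    Option.isSome_iff_exists.mp (by rw [List.find?_isSome]; simpa using hpre')
  have hfindr : ∃ b, line.toList.reverse.find? (·.isDigit) = some b :=
    Option.isSome_iff_exists.mp (by rw [List.find?_isSome]; simpa using hpre')
  obtain ⟨a, hA⟩ := hfind
  obtain ⟨b, hB⟩ := hfindr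
  have ha : a.isDigit = true := List.find?_some hA
  have hb : b.isDigit = true := List.find?_some hB
  simp only [hA, hB, Option.isNone_none]
  simp [parse_two a b ha hb, mul_comm]
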